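-- pv_equiv track=rewrite | github.com/siyana-plachkova/programming101 | week1/3-TheFinalRound/prepare_meal.py | prepare_meal
-- ===== SOURCE A (Python) =====
-- def prepare_meal(number):
--     max = 0
--     for num in range(number, 0, -1):
--         if number % (3 ** num) == 0:
--             max = num
--             break
--
--     if number == 5:
--         return "eggs"
--     if max == 0:
--         return ""
--
--     eggs = ""
--     if number % 5 == 0:
--         eggs = " and eggs"
--
--     return " ".join(["spam"] * max) + eggs
-- ===== SOURCE B (Python) =====
-- def prepare_meal(number):
--     if number == 5:
--         return "eggs"
--     if number <= 0 or number % 3 != 0: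
--         return ""
--     count = 0
--     n = number
--     while n % 3 == 0:
--         n //= 3
--         count += 1
--     meal = " ".join(["spam"] * count)
--     if number % 5 == 0:
--         meal += " and eggs"
--     return meal
-- ===== Notes on version B (the rewrite author's own statement) =====
-- stated objective: faster
-- what changed: Replaces the O(number) countdown loop that tests divisibility by huge powers 3**num with a 3-adic valuation computed by repeated division by 3.
import Mathlib
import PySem

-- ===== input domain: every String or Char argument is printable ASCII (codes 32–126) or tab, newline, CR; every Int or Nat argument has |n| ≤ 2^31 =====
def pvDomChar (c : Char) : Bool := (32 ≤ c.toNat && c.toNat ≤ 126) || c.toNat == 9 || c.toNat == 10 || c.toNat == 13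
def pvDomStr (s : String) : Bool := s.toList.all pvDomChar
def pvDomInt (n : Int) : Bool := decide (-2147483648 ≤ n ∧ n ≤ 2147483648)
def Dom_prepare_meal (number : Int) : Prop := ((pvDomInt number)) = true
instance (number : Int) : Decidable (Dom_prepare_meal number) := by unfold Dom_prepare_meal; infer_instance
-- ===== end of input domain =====

-- B replaces A's O(number) countdown over huge powers 3**num by the 3-adic valuation
-- computed by repeated division by 3 (asymptotically faster).

-- ===== PORT A =====
-- the for-loop with break: first num in the descending range with number % 3**num == 0, else 0
def pvFindMax (number : Int) : List Int → Int
  | [] => 0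
  | n :: rest =>
      if PySem.Int.mod number ((3 : Int) ^ n.toNat) = 0 then n else pvFindMax number rest

def prepare_meal (number : Int) : String :=
  let max := pvFindMax number (PySem.List.pyRange number 0 (-1))
  if number = 5 then "eggs"
  else if max = 0 then ""
  else
    let eggs : String := if PySem.Int.mod number 5 = 0 then " and eggs" else ""
    PySem.Str.join " " (PySem.List.pyRepeat ["spam"] max) ++ eggs

-- ===== PORT B =====
-- the while loop of Source B; the '0 < n' conjunct is only a totality guard (n stays positive)
def pvV3 (n : Int) (count : Int) : Int :=
  if h : PySem.Int.mod n 3 = 0 ∧ 0 < n then pvV3 (PySem.Int.floordiv n 3) (count + 1) else count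
termination_by n.toNat
decreasing_by
  rcases h with ⟨_, h2⟩
  rw [PySem.Int.floordiv_eq_ediv_of_pos (by norm_num)]
  omega

def prepare_meal_alt (number : Int) : String :=
  if number = 5 then "eggs"
  else if number ≤ 0 ∨ PySem.Int.mod number 3 ≠ 0 then ""
  else
    let count := pvV3 number 0
    let meal := PySem.Str.join " " (PySem.List.pyRepeat ["spam"] count)
    if PySem.Int.mod number 5 = 0 then meal ++ " and eggs" else meal

-- ===== PRECONDITION & SPEC =====
def Spec_prepare_meal (number : Int) (out : String) : Prop := out = prepare_meal_alt number
instance (number : Int) (out : String) : Decidable (Spec_prepare_meal number out) := by unfold Spec_prepare_meal; infer_instance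

-- ===== CLAIM (what is proved, stated in full; the proofs are below) =====
def Claim_equal_prepare_meal : Prop := ∀ (number : Int), Dom_prepare_meal number → Spec_prepare_meal number (prepare_meal number)

-- ===== LEMMAS AND PROOFS =====

theorem pvFindMax_nil_of_none (number : Int) (l : List Int)
    (h : ∀ x ∈ l, ¬ PySem.Int.mod number ((3 : Int) ^ x.toNat) = 0) :
    pvFindMax number l = 0 := by
  induction l with
  | nil => rfl
  | cons a t ih =>
      simp only [pvFindMax]
      rw [if_neg (h a (by simp))]
      exact ih (fun x hx => h x (by simp [hx]))

theorem pvV3_eq (n : Nat) (hn : 0 < n) (c : Int) :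
    pvV3 (n : Int) c = c + (padicValNat 3 n : Int) := by
  induction n using Nat.strong_induction_on generalizing c with
  | _ n ih =>
    rw [pvV3]
    by_cases hd : (3 : Nat) ∣ n
    · have h3 : PySem.Int.mod (n : Int) 3 = 0 := by
        rw [PySem.Int.mod_eq_zero_iff_dvd]
        exact_mod_cast Int.natCast_dvd_natCast.mpr hd
      rw [dif_pos ⟨h3, by exact_mod_cast hn⟩]
      have hfd : PySem.Int.floordiv (n : Int) 3 = ((n / 3 : Nat) : Int) := by
        exact_mod_cast PySem.Int.floordiv_natCast n 3
      rw [hfd]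
      have hlt : n / 3 < n := Nat.div_lt_self hn (by norm_num)
      have hpos : 0 < n / 3 := Nat.div_pos (Nat.le_of_dvd hn hd) (by norm_num)
      rw [ih (n / 3) hlt hpos (c + 1)]
      have hv : padicValNat 3 (n / 3) = padicValNat 3 n - 1 := padicValNat.div hd
      haveI : Fact (Nat.Prime 3) := ⟨by norm_num⟩
      have hv1 : 1 ≤ padicValNat 3 n := one_le_padicValNat_of_dvd (by omega) hd
      rw [hv]; omega
    · have h3 : ¬ PySem.Int.mod (n : Int) 3 = 0 := by
        rw [PySem.Int.mod_eq_zero_iff_dvd]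
        intro hc
        exact hd (by exact_mod_cast hc)
      rw [dif_neg (by tauto)]
      rw [padicValNat.eq_zero_of_not_dvd hd]
      simp

theorem pvFindMax_range (number v : Int) (hv : 1 ≤ v)
    (hdvd : PySem.Int.mod number ((3 : Int) ^ v.toNat) = 0)
    (hnd : ∀ k : Int, v < k → ¬ PySem.Int.mod number ((3 : Int) ^ k.toNat) = 0) :
    ∀ m : Nat, pvFindMax number (PySem.List.pyRange (v + m) 0 (-1)) = v := by
  intro m
  induction m with
  | zero =>
      push_cast
      rw [add_zero]
      rw [PySem.List.pyRange_neg_one_cons (by omega : (0:Int) < v)]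
      simp only [pvFindMax]
      rw [if_pos (by simpa using hdvd)]

  | succ k ih =>
      push_cast
      rw [PySem.List.pyRange_neg_one_cons (by omega : (0:Int) < v + (↑k+1))]
      simp only [pvFindMax]
      rw [if_neg (hnd _ (by omega))]
      have h2 : (v + ((k:Int)+1)) - 1 = v + (k:Int) := by omega
      rw [h2]
      exact ih

-- ===== VERDICT (by name: the statement is the Claim_ definition above) =====
theorem prepare_meal_spec : Claim_equal_prepare_meal := by
  unfold Claim_equal_prepare_meal Spec_prepare_meal
  intro number _
  unfold prepare_meal prepare_meal_alt
  by_cases h5 : number = 5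
  · simp only [if_pos h5]
  · rw [if_neg h5, if_neg h5]
    by_cases hpos : number ≤ 0
    · rw [PySem.List.pyRange_neg_one_eq_nil hpos]
      simp only [pvFindMax, if_pos (Or.inl hpos), if_true]
    · rw [not_le] at hpos
      by_cases hd3 : (3 : Int) ∣ number
      · haveI : Fact (Nat.Prime 3) := ⟨by norm_num⟩
        have hN : ((number.toNat : Int)) = number := Int.toNat_of_nonneg (le_of_lt hpos)
        have hNpos : 0 < number.toNat := by omega
        have hdN : (3 : Nat) ∣ number.toNat := by
          rw [← Int.natCast_dvd_natCast]; rw [hN]; exact_mod_cast hd3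
        have hv1 : 1 ≤ padicValNat 3 number.toNat :=
          one_le_padicValNat_of_dvd (by omega) hdN
        have hdvdN : (3 : Nat) ^ padicValNat 3 number.toNat ∣ number.toNat :=
          pow_padicValNat_dvd
        have hdvd : PySem.Int.mod number ((3 : Int) ^ ((padicValNat 3 number.toNat : Int)).toNat) = 0 := by
          rw [PySem.Int.mod_eq_zero_iff_dvd]
          rw [Int.toNat_natCast, ← hN]
          exact_mod_cast hdvdN
        have hnd : ∀ k : Int, ((padicValNat 3 number.toNat : Int)) < k →
            ¬ PySem.Int.mod number ((3 : Int) ^ k.toNat) = 0 := by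
          intro k hk hc
          rw [PySem.Int.mod_eq_zero_iff_dvd] at hc
          have hcN : (3 : Nat) ^ k.toNat ∣ number.toNat := by
            rw [← Int.natCast_dvd_natCast]; push_cast; rw [hN]; exact hc
          have := (padicValNat_dvd_iff_le (p := 3) (by omega : number.toNat ≠ 0)).mp hcN
          omega
        have hle : ((padicValNat 3 number.toNat : Int)) ≤ number := by
          have h1 : padicValNat 3 number.toNat < 3 ^ padicValNat 3 number.toNat :=
            Nat.lt_pow_self (by norm_num)
          have h2 : 3 ^ padicValNat 3 number.toNat ≤ number.toNat :=
            Nat.le_of_dvd hNpos hdvdN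
          omega
        have hA : pvFindMax number (PySem.List.pyRange number 0 (-1)) =
            ((padicValNat 3 number.toNat : Int)) := by
          have hthis := pvFindMax_range number ((padicValNat 3 number.toNat : Int))
            (by omega) hdvd hnd ((number - (padicValNat 3 number.toNat : Int)).toNat)
          rw [show ((padicValNat 3 number.toNat : Int)) +
              (((number - (padicValNat 3 number.toNat : Int)).toNat : Nat) : Int) = number
            by omega] at hthis
          exact hthis
        have hB : pvV3 number 0 = ((padicValNat 3 number.toNat : Int)) := by
          have hthis := pvV3_eq number.toNat hNpos 0
          rw [hN] at hthis
          omega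
        simp only [hA, hB]
        rw [if_neg (by omega : ¬ ((padicValNat 3 number.toNat : Int)) = 0)]
        have hnotB : ¬ (number ≤ 0 ∨ PySem.Int.mod number 3 ≠ 0) := by
          simp only [not_or, not_le, not_not]
          exact ⟨hpos, by rw [PySem.Int.mod_eq_zero_iff_dvd]; exact hd3⟩
        rw [if_neg hnotB]
        by_cases h5d : PySem.Int.mod number 5 = 0
        · rw [if_pos h5d, if_pos h5d]
        · rw [if_neg h5d, if_neg h5d]
          simp
      · have hA : pvFindMax number (PySem.List.pyRange number 0 (-1)) = 0 := by
          apply pvFindMax_nil_of_none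
          intro x hx hc
          rw [PySem.List.mem_pyRange_neg_one] at hx
          rw [PySem.Int.mod_eq_zero_iff_dvd] at hc
          exact hd3 (dvd_trans (dvd_pow_self (3 : Int) (by omega : x.toNat ≠ 0)) hc)
        simp only [hA, if_true]
        rw [if_pos (Or.inr (fun hc => hd3 ((PySem.Int.mod_eq_zero_iff_dvd _ _).mp hc)))]
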